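-- pv_equiv track=rewrite | github.com/oar-team/evalys | evalys/interval_set.py | _ids_to_itervals
-- ===== SOURCE A (Python) =====
-- def _ids_to_itervals(ids):
--     """Convert list of ID (int) to list of intervals"""
--     itvs = []
--     if ids:
--         b = ids[0]
--         e = ids[0]
--         for i in ids:
--             if i > (e + 1):  # end itv and prepare new itv
--                 itvs.append((b, e))
--                 b = i
--             e = i
--         itvs.append((b, e))
--
--     return itvs
-- ===== SOURCE B (Python) =====
-- def _ids_to_itervals(ids):
--     """Convert list of ID (int) to list of intervals.
--     Builds the result back-to-front: traverse ids in reverse, extending the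
--     most recent interval or opening a fresh one, then reverse the buffer."""
--     rev = []
--     for i in reversed(ids):
--         if rev and rev[-1][0] <= i + 1:
--             rev[-1] = (i, rev[-1][1])
--         else:
--             rev.append((i, i))
--     rev.reverse()
--     return rev
-- ===== Notes on version B (the rewrite author's own statement) =====
-- stated objective: alternative
-- what changed: B builds the interval list back-to-front: it traverses ids in reverse, extending the most recent interval or opening a fresh singleton in a reversed buffer which is reversed once at the end, instead of A's forward scan with explicit (begin,end) accumulator state and a trailing append.
import Mathlib
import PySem

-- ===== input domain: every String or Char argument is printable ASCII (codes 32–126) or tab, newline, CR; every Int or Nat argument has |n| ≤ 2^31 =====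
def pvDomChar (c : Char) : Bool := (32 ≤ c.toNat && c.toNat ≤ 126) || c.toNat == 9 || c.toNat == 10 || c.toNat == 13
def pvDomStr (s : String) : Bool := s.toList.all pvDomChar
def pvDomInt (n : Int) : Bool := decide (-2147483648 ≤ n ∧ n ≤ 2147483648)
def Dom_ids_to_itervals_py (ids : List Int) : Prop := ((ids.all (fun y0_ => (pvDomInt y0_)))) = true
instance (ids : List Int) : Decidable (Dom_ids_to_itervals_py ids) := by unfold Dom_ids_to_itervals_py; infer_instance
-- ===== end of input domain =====

-- B builds the interval list back-to-front (reverse traversal, prepend/extend at the front)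
-- instead of A's forward scan with (begin,end) accumulator state; same return value, total.

-- ===== PORT A =====
-- forward loop over ids with state (itvs, b, e), then a final append
def ids_to_itervals_py (ids : List Int) : List (Int × Int) :=
  match ids with
  | [] => []
  | x :: _ =>
    let s := ids.foldl
      (fun (st : List (Int × Int) × Int × Int) i =>
        if i > st.2.2 + 1 then (st.1 ++ [(st.2.1, st.2.2)], i, i) else (st.1, st.2.1, i))
      ([], x, x)
    s.1 ++ [(s.2.1, s.2.2)]

-- ===== PORT B =====
-- 'for i in reversed(ids)' = a left fold over ids.reverse; the Python buffer 'rev' is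
-- touched only at its END ('rev[-1]', 'rev.append'), so it is represented head-first here
-- ('rev[-1]' = head, 'append' = cons): the final 'rev.reverse()' is then the identity reading.
def ids_to_itervals_py_alt (ids : List Int) : List (Int × Int) :=
  ids.reverse.foldl
    (fun out i =>
      match out with
      | (s, e) :: rest => if s ≤ i + 1 then (i, e) :: rest else (i, i) :: (s, e) :: rest
      | [] => [(i, i)])
    []

-- ===== PRECONDITION & SPEC =====
def Spec_ids_to_itervals_py (ids : List Int) (out : List (Int × Int)) : Prop := out = ids_to_itervals_py_alt ids
instance (ids : List Int) (out : List (Int × Int)) : Decidable (Spec_ids_to_itervals_py ids out) := by unfold Spec_ids_to_itervals_py; infer_instance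

-- ===== CLAIM (what is proved, stated in full; the proofs are below) =====
def Claim_equal_ids_to_itervals_py : Prop := ∀ (ids : List Int), Dom_ids_to_itervals_py ids → Spec_ids_to_itervals_py ids (ids_to_itervals_py ids)

-- ===== LEMMAS AND PROOFS =====

-- reference forward grouping: state (b, e), emits (b, e) at each gap and at the end
def pvGroups (b e : Int) : List Int → List (Int × Int)
  | [] => [(b, e)]
  | i :: rest => if i > e + 1 then (b, e) :: pvGroups i i rest else pvGroups b i rest

-- B's fold step
def pvStep (i : Int) (out : List (Int × Int)) : List (Int × Int) :=
  match out with
  | (s, e) :: rest => if s ≤ i + 1 then (i, e) :: rest else (i, i) :: (s, e) :: rest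
  | [] => [(i, i)]

theorem alt_eq_foldr (ids : List Int) : ids_to_itervals_py_alt ids = ids.foldr pvStep [] := by
  show ids.reverse.foldl (fun out i => pvStep i out) [] = _
  rw [List.foldl_reverse]

-- A's fold, with any accumulator, computes acc ++ pvGroups b e xs
theorem foldA_eq_groups (xs : List Int) (acc : List (Int × Int)) (b e : Int) :
    (let s := xs.foldl
      (fun (st : List (Int × Int) × Int × Int) i =>
        if i > st.2.2 + 1 then (st.1 ++ [(st.2.1, st.2.2)], i, i) else (st.1, st.2.1, i))
      (acc, b, e)
     s.1 ++ [(s.2.1, s.2.2)]) = acc ++ pvGroups b e xs := by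
  induction xs generalizing acc b e with
  | nil => simp [pvGroups]
  | cons i rest ih =>
    simp only [List.foldl_cons, pvGroups]
    by_cases h : i > e + 1
    · simp only [if_pos h]
      rw [ih]
      simp
    · simp only [if_neg h]
      rw [ih]

-- head of B's result starts with the first element
theorem foldr_head (x : Int) (xs : List Int) :
    ∃ e r, (x :: xs).foldr pvStep [] = (x, e) :: r := by
  cases xs with
  | nil => exact ⟨x, [], rfl⟩
  | cons y ys =>
    obtain ⟨e, r, h⟩ := foldr_head y ys
    simp only [List.foldr_cons] at h ⊢
    rw [h]
    by_cases hc : y ≤ x + 1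
    · exact ⟨e, r, by simp [pvStep, hc]⟩
    · exact ⟨x, (y, e) :: r, by simp [pvStep, hc]⟩

-- main bridge: forward grouping from any state (b,e) vs the backward build of the tail
theorem groups_eq_step (xs : List Int) (b e : Int) :
    pvGroups b e xs =
      match xs.foldr pvStep [] with
      | [] => [(b, e)]
      | (s, e') :: r => if s ≤ e + 1 then (b, e') :: r else (b, e) :: (s, e') :: r := by
  induction xs generalizing b e with
  | nil => simp [pvGroups]
  | cons i rest ih =>
    simp only [pvGroups, List.foldr_cons]
    cases hr : rest.foldr pvStep [] with
    | nil =>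
      have hrest : rest = [] := by
        cases rest with
        | nil => rfl
        | cons y ys => obtain ⟨e', r, h⟩ := foldr_head y ys; rw [h] at hr; cases hr
      subst hrest
      by_cases h : i > e + 1
      · simp [pvGroups, pvStep, if_pos h, show ¬ (i ≤ e + 1) by omega]
      · simp [pvGroups, pvStep, if_neg h, show i ≤ e + 1 by omega]
    | cons p r =>
      obtain ⟨s, e'⟩ := p
      by_cases h : i > e + 1
      · simp only [if_pos h]
        rw [ih i i, hr]
        by_cases hs : s ≤ i + 1
        · simp [pvStep, hs, show ¬ (i ≤ e + 1) by omega]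
        · simp [pvStep, hs, show ¬ (i ≤ e + 1) by omega]
      · simp only [if_neg h]
        rw [ih b i, hr]
        by_cases hs : s ≤ i + 1
        · simp [pvStep, hs, show i ≤ e + 1 by omega]
        · simp [pvStep, hs, show i ≤ e + 1 by omega]

theorem ab_eq (ids : List Int) : ids_to_itervals_py ids = ids_to_itervals_py_alt ids := by
  cases ids with
  | nil => rfl
  | cons x xs =>
    rw [alt_eq_foldr]
    show (let s := (x :: xs).foldl _ ([], x, x); s.1 ++ [(s.2.1, s.2.2)]) = _
    rw [foldA_eq_groups (x :: xs) [] x x]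
    simp only [List.nil_append, List.foldr_cons]
    rw [show pvGroups x x (x :: xs) = pvGroups x x xs by
      simp [pvGroups, show ¬ x > x + 1 by omega]]
    rw [groups_eq_step xs x x]
    cases hr : xs.foldr pvStep [] with
    | nil => simp [pvStep]
    | cons p r =>
      obtain ⟨s, e'⟩ := p
      by_cases hs : s ≤ x + 1 <;> simp [pvStep, hs]

-- ===== VERDICT (by name: the statement is the Claim_ definition above) =====
theorem ids_to_itervals_py_spec : Claim_equal_ids_to_itervals_py := by
  intro ids _
  exact ab_eq ids
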